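-- pv_equiv track=rewrite | github.com/liziye627-design/aletheia-design | core-components/aletheia-backend/services/insights/value_mining_engine.py | _pick_support_source
-- ===== SOURCE A (Python) =====
-- from typing import Any, Dict, List
--
-- def _pick_support_source(evidence: List[Dict[str, Any]]) -> Dict[str, Any]:
--     sorted_evidence = sorted(
--         [card for card in evidence if isinstance(card, dict)],
--         key=lambda x: int(x.get("source_tier") or 3),
--     )
--     if not sorted_evidence:
--         return {}
--     return sorted_evidence[0]
-- ===== SOURCE B (Python) =====
-- def _pick_support_source(evidence):
--     best = None
--     best_key = 0
--     for card in evidence: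
--         if not isinstance(card, dict):
--             continue
--         k = int(card.get("source_tier") or 3)
--         if best is None or k < best_key:
--             best, best_key = card, k
--     return best if best is not None else {}
-- ===== Notes on version B (the rewrite author's own statement) =====
-- stated objective: alternative
-- what changed: Replaced sorting the filtered evidence by key and taking the first element with a single linear scan that keeps the running best card, updating only on a strictly smaller key so the earliest card among ties wins like the stable sort.
import Mathlib
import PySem

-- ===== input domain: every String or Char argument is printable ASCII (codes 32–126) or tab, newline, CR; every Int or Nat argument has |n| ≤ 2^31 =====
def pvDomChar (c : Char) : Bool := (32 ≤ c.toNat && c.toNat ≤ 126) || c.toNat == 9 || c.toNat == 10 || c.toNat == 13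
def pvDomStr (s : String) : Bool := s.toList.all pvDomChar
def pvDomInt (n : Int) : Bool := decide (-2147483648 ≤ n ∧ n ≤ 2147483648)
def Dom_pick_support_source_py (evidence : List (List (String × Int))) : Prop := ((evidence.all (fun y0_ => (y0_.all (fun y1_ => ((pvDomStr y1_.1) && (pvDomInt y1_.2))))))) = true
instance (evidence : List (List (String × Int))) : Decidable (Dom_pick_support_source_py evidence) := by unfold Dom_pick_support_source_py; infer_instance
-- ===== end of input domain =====

-- B replaces A's sort-then-take-first by a single linear scan keeping the running best card
-- (strict '<', so the earliest card among key ties wins, like the stable sort).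

-- ===== PORT A =====
-- key=lambda x: int(x.get("source_tier") or 3) — int() on an int is the identity; 'or 3'
-- replaces a missing key AND a falsy (zero) value by 3.
def pvKey (card : List (String × Int)) : Int :=
  match (PySem.Dict.mk card).get? "source_tier" with
  | some v => if v = 0 then 3 else v
  | none => 3

def pick_support_source_py (evidence : List (List (String × Int))) : List (String × Int) :=
  -- [card for card in evidence if isinstance(card, dict)]: under the type convention every
  -- element is a dict, so the isinstance test is ported as a trivially-true filter.
  let sorted_evidence := PySem.List.sorted (evidence.filter (fun _ => true)) pvKey false
  match sorted_evidence with
  | [] => []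
  | m :: _ => m

-- ===== PORT B =====
def pvBStep (best : Option ((List (String × Int)) × Int)) (card : List (String × Int)) :
    Option ((List (String × Int)) × Int) :=
  let k := pvKey card
  match best with
  | none => some (card, k)
  | some (b, bk) => if k < bk then some (card, k) else some (b, bk)

def pick_support_source_py_alt (evidence : List (List (String × Int))) : List (String × Int) :=
  match evidence.foldl pvBStep none with
  | none => []
  | some (b, _) => b

-- ===== PRECONDITION & SPEC =====
def Spec_pick_support_source_py (evidence : List (List (String × Int))) (out : List (String × Int)) : Prop := out = pick_support_source_py_alt evidence
instance (evidence : List (List (String × Int))) (out : List (String × Int)) : Decidable (Spec_pick_support_source_py evidence out) := by unfold Spec_pick_support_source_py; infer_instance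

-- ===== CLAIM (what is proved, stated in full; the proofs are below) =====
def Claim_equal_pick_support_source_py : Prop := ∀ (evidence : List (List (String × Int))), Dom_pick_support_source_py evidence → Spec_pick_support_source_py evidence (pick_support_source_py evidence)

-- ===== LEMMAS AND PROOFS =====

-- abstract scan step: keep the earlier element unless the new key is strictly smaller
def pvStep (o : Option (List (String × Int))) (x : List (String × Int)) : Option (List (String × Int)) :=
  match o with
  | none => some x
  | some b => if pvKey x < pvKey b then some x else some b

theorem head_insertBy (x : List (String × Int)) (ys : List (List (String × Int)))
    (bf : List (String × Int) → List (String × Int) → Bool) :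
    (PySem.List.insertBy bf x ys).head? =
      some (match ys with | [] => x | y :: _ => if bf x y then x else y) := by
  cases ys with
  | nil => rfl
  | cons y t =>
    simp only [PySem.List.insertBy]
    by_cases h : bf x y <;> simp [h]

theorem foldl_ins_head (xs : List (List (String × Int))) :
    ∀ acc : List (List (String × Int)),
      (xs.foldl (fun acc x => PySem.List.insertBy (fun a b => decide (pvKey a < pvKey b)) x acc) acc).head?
        = xs.foldl pvStep acc.head? := by
  induction xs with
  | nil => intro acc; rfl
  | cons x t ih =>
    intro acc
    simp only [List.foldl_cons]
    rw [ih]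
    congr 1
    rw [head_insertBy]
    cases acc with
    | nil => rfl
    | cons y ys =>
      simp only [pvStep, List.head?_cons]
      by_cases h : pvKey x < pvKey y <;> simp [h]

theorem scan_eq (xs : List (List (String × Int))) :
    ∀ o : Option (List (String × Int)),
      xs.foldl pvBStep (o.map fun e => (e, pvKey e))
        = (xs.foldl pvStep o).map (fun e => (e, pvKey e)) := by
  induction xs with
  | nil => intro o; rfl
  | cons x t ih =>
    intro o
    simp only [List.foldl_cons]
    have hstep : pvBStep (o.map fun e => (e, pvKey e)) x
        = (pvStep o x).map (fun e => (e, pvKey e)) := by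
      cases o with
      | none => rfl
      | some b =>
        simp only [pvBStep, pvStep, Option.map_some]
        by_cases h : pvKey x < pvKey b <;> simp [h]
    rw [hstep, ih]

-- ===== VERDICT (by name: the statement is the Claim_ definition above) =====
theorem pick_support_source_py_spec : Claim_equal_pick_support_source_py := by
  intro evidence _
  unfold Spec_pick_support_source_py pick_support_source_py pick_support_source_py_alt
  rw [PySem.List.sorted_eq_foldl_insertBy]
  have hB := scan_eq evidence none
  simp only [Option.map_none] at hB
  rw [hB]
  have hA := foldl_ins_head (evidence.filter (fun _ => true)) []
  simp only [List.filter_true, List.head?_nil] at hA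
  simp only [List.filter_true]
  rcases hfold : evidence.foldl pvStep none with _ | b
  · rw [hfold] at hA
    rw [List.head?_eq_none_iff] at hA
    rw [hA]; rfl
  · rw [hfold] at hA
    rcases hs : (evidence.foldl (fun acc x => PySem.List.insertBy (fun a b => decide (pvKey a < pvKey b)) x acc) []) with _ | ⟨m, t⟩
    · rw [hs] at hA; simp at hA
    · rw [hs] at hA
      simp only [List.head?_cons, Option.some.injEq] at hA
      exact hA
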